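-- pv_equiv track=rewrite | github.com/JayJayCsC110AB/Codepath | Unit 3 - Dictionaries/findpairs.py | num_popular_pairs
-- ===== SOURCE A (Python) =====
-- def num_popular_pairs(popularity_scores):
--     scores = {}
--     pairs = 0
--     for values in popularity_scores:
--         scores[values] = scores.get(values, 0) +1
--
--     for values in scores:
--         pairs += (scores[values] * (scores[values]-1))//2
--     return pairs
-- ===== SOURCE B (Python) =====
-- def num_popular_pairs(popularity_scores):
--     seen = {}
--     pairs = 0
--     for v in popularity_scores:
--         pairs += seen.get(v, 0)
--         seen[v] = seen.get(v, 0) + 1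
--     return pairs
-- ===== Notes on version B (the rewrite author's own statement) =====
-- stated objective: alternative
-- what changed: Single pass that adds the running count of each value to the pair total as it goes, instead of building the full frequency table first and then summing count*(count-1)//2 over its keys in a second loop.
import Mathlib
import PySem

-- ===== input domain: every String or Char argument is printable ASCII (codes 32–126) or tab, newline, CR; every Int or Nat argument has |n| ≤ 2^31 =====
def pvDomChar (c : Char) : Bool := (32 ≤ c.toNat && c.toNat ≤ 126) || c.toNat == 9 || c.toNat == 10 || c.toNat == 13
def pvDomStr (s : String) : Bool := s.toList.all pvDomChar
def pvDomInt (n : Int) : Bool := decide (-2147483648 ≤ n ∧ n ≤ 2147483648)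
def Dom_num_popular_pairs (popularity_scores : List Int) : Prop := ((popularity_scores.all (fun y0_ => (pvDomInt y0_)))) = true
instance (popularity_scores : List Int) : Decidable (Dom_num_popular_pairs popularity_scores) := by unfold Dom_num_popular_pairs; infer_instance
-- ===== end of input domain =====

-- B replaces A's two-phase count-then-combine (frequency dict, then sum of c*(c-1)//2)
-- by a single pass that adds the running count of each value to the pair total.


-- ===== PORT A =====
-- `scores[values]` in the second loop: the key always comes from `scores` itself,
-- so `getD _ 0` is exact here (no KeyError is reachable).
def num_popular_pairs (popularity_scores : List Int) : Int :=
  let scores := popularity_scores.foldl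
    (fun d v => d.insert v (d.getD v 0 + 1)) PySem.Dict.empty
  scores.keys.foldl
    (fun pairs k => pairs + PySem.Int.floordiv (scores.getD k 0 * (scores.getD k 0 - 1)) 2) 0

-- ===== PORT B =====
def num_popular_pairs_alt (popularity_scores : List Int) : Int :=
  (popularity_scores.foldl
    (fun (st : PySem.Dict Int Int × Int) v =>
      (st.1.insert v (st.1.getD v 0 + 1), st.2 + st.1.getD v 0))
    (PySem.Dict.empty, 0)).2

-- ===== PRECONDITION & SPEC =====
def Spec_num_popular_pairs (popularity_scores : List Int) (out : Int) : Prop := out = num_popular_pairs_alt popularity_scores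
instance (popularity_scores : List Int) (out : Int) : Decidable (Spec_num_popular_pairs popularity_scores out) := by unfold Spec_num_popular_pairs; infer_instance

-- ===== CLAIM (what is proved, stated in full; the proofs are below) =====
def Claim_equal_num_popular_pairs : Prop := ∀ (popularity_scores : List Int), Dom_num_popular_pairs popularity_scores → Spec_num_popular_pairs popularity_scores (num_popular_pairs popularity_scores)

-- ===== LEMMAS AND PROOFS =====

-- Common reference value: sum over the distinct elements of l of C(count, 2).
def pvF (l : List Int) : Int :=
  ((PySem.Set.ofList l).map
    (fun k => PySem.Int.floordiv ((l.count k : Int) * ((l.count k : Int) - 1)) 2)).sum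

theorem pvA_eq_F (l : List Int) : num_popular_pairs l = pvF l := by
  unfold num_popular_pairs pvF
  rw [PySem.Dict.foldl_insert_getD_add_one_eq_counter,
      PySem.List.foldl_add, PySem.Dict.keys_counter]
  simp [PySem.Dict.getD_counter]

-- the dict component of B's fold is A's counting fold
theorem pvB_fst (l : List Int) (d : PySem.Dict Int Int) (p : Int) :
    (l.foldl (fun (st : PySem.Dict Int Int × Int) v =>
      (st.1.insert v (st.1.getD v 0 + 1), st.2 + st.1.getD v 0)) (d, p)).1
    = l.foldl (fun d v => d.insert v (d.getD v 0 + 1)) d := by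
  induction l generalizing d p with
  | nil => rfl
  | cons x xs ih => simpa using ih _ _

-- the pairs accumulator is translation-invariant
theorem pvB_snd_shift (l : List Int) (d : PySem.Dict Int Int) (p : Int) :
    (l.foldl (fun (st : PySem.Dict Int Int × Int) v =>
      (st.1.insert v (st.1.getD v 0 + 1), st.2 + st.1.getD v 0)) (d, p)).2
    = p + (l.foldl (fun (st : PySem.Dict Int Int × Int) v =>
      (st.1.insert v (st.1.getD v 0 + 1), st.2 + st.1.getD v 0)) (d, 0)).2 := by
  induction l generalizing d p with
  | nil => simp
  | cons x xs ih =>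
    simp only [List.foldl_cons]
    rw [ih, ih (d.insert x (d.getD x 0 + 1)) (0 + d.getD x 0)]
    ring

theorem pvFd2 (n : Int) :
    PySem.Int.floordiv ((n + 1) * n) 2 = PySem.Int.floordiv (n * (n - 1)) 2 + n := by
  have h : (n + 1) * n = n * (n - 1) + n * 2 := by ring
  rw [h, PySem.Int.floordiv_eq_ediv_of_pos (by norm_num),
      PySem.Int.floordiv_eq_ediv_of_pos (by norm_num), Int.add_mul_ediv_right _ _ (by norm_num)]

theorem pvSum_update {S : List Int} (v c : Int) (f g : Int → Int) (hS : S.Nodup) (hv : v ∈ S)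
    (h : ∀ k ∈ S, k ≠ v → g k = f k) (hfv : g v = f v + c) :
    (S.map g).sum = (S.map f).sum + c := by
  induction S with
  | nil => cases hv
  | cons x xs ih =>
    rcases List.mem_cons.mp hv with rfl | hvx
    · have : ∀ k ∈ xs, g k = f k := by
        intro k hk
        exact h k (List.mem_cons_of_mem _ hk) (fun he => (List.nodup_cons.mp hS).1 (he ▸ hk))
      simp only [List.map_cons, List.sum_cons, hfv, List.map_congr_left this]
      ring
    · have hx : g x = f x := by
        refine h x List.mem_cons_self (fun he => ?_)
        exact (List.nodup_cons.mp hS).1 (he ▸ hvx)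
      simp only [List.map_cons, List.sum_cons, hx,
        ih (List.nodup_cons.mp hS).2 hvx (fun k hk => h k (List.mem_cons_of_mem _ hk))]
      ring

theorem pvF_append (l : List Int) (v : Int) : pvF (l ++ [v]) = pvF l + l.count v := by
  unfold pvF
  rw [PySem.Set.ofList_append_singleton]
  by_cases hv : v ∈ l
  · have hmem : v ∈ PySem.Set.ofList l := (PySem.Set.mem_ofList _ _).mpr hv
    rw [PySem.Set.add_of_mem hmem]
    refine pvSum_update v (l.count v) _ _ (PySem.Set.nodup_ofList l) hmem ?_ ?_
    · intro k hk hkv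
      have : (l ++ [v]).count k = l.count k := by
        simp [List.count_append, Ne.symm hkv]
      rw [this]
    · have : ((l ++ [v]).count v : Int) = (l.count v : Int) + 1 := by
        simp [List.count_append]
      rw [this]
      have := pvFd2 ((l.count v : Int))
      simpa using this
  · have hnmem : v ∉ PySem.Set.ofList l := fun h => hv ((PySem.Set.mem_ofList _ _).mp h)
    rw [PySem.Set.add_of_not_mem hnmem]
    have hcv : (l ++ [v]).count v = 1 := by
      simp [List.count_append, List.count_eq_zero_of_not_mem hv]
    have hc0 : l.count v = 0 := List.count_eq_zero_of_not_mem hv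
    rw [List.map_append, List.sum_append]
    have hcongr : ∀ k ∈ PySem.Set.ofList l,
        PySem.Int.floordiv (((l ++ [v]).count k : Int) * (((l ++ [v]).count k : Int) - 1)) 2
        = PySem.Int.floordiv ((l.count k : Int) * ((l.count k : Int) - 1)) 2 := by
      intro k hk
      have hkv : k ≠ v := fun he => hnmem (he ▸ hk)
      simp [List.count_append, Ne.symm hkv]
    rw [List.map_congr_left hcongr]
    simp [hc0, PySem.Int.floordiv]

theorem pvB_eq_F (l : List Int) : num_popular_pairs_alt l = pvF l := by
  induction l using List.reverseRecOn with
  | nil => rfl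
  | append_singleton xs v ih =>
    unfold num_popular_pairs_alt at ih ⊢
    rw [List.foldl_append, List.foldl_cons, List.foldl_nil, pvB_snd_shift, pvF_append, ← ih]
    simp [pvB_fst, PySem.Dict.getD_foldl_insert_add_one]

-- ===== VERDICT (by name: the statement is the Claim_ definition above) =====
theorem num_popular_pairs_spec : Claim_equal_num_popular_pairs := by
  intro l _
  unfold Spec_num_popular_pairs
  rw [pvA_eq_F, pvB_eq_F]
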